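-- pv_equiv track=rewrite | github.com/yfding98/EEG_SUAT | training/label_encoder.py | get_channel_frequency_features
-- ===== SOURCE A (Python) =====
-- from typing import List, Dict, Set, Tuple
--
-- def get_channel_frequency_features(channels: List[str]) -> Dict[str, int]:
--     """
--     Extract frequency-based features from channel names.
--
--     Args:
--         channels: List of channel names
--
--     Returns:
--         Dictionary with frequency band counts
--     """
--     features = {
--         'frontal': 0,
--         'temporal': 0,
--         'parietal': 0,
--         'occipital': 0,
--         'central': 0,
--         'other': 0
--     }
--
--     for ch in channels:
--         ch_upper = ch.upper()
--         if ch_upper.startswith('F'):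
--             features['frontal'] += 1
--         elif ch_upper.startswith('T'):
--             features['temporal'] += 1
--         elif ch_upper.startswith('P'):
--             features['parietal'] += 1
--         elif ch_upper.startswith('O'):
--             features['occipital'] += 1
--         elif ch_upper.startswith('C'):
--             features['central'] += 1
--         else:
--             features['other'] += 1
--
--     return features
-- ===== SOURCE B (Python) =====
-- from typing import List, Dict
--
-- def get_channel_frequency_features(channels: List[str]) -> Dict[str, int]:
--     """Tally first letters once, then read the five band counts off the table."""
--     first: Dict[str, int] = {}
--     for ch in channels:
--         k = ch.upper()[:1]
--         first[k] = first.get(k, 0) + 1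
--     f = first.get('F', 0)
--     t = first.get('T', 0)
--     p = first.get('P', 0)
--     o = first.get('O', 0)
--     c = first.get('C', 0)
--     return {
--         'frontal': f,
--         'temporal': t,
--         'parietal': p,
--         'occipital': o,
--         'central': c,
--         'other': len(channels) - (f + t + p + o + c),
--     }
-- ===== Notes on version B (the rewrite author's own statement) =====
-- stated objective: simpler
-- what changed: A tallies via a six-way if/elif startswith chain updating a fixed dict per channel; B builds a one-pass frequency table of first letters (ch.upper()[:1]), reads the five band counts off it, and derives 'other' as len(channels) minus their sum.
import Mathlib
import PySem

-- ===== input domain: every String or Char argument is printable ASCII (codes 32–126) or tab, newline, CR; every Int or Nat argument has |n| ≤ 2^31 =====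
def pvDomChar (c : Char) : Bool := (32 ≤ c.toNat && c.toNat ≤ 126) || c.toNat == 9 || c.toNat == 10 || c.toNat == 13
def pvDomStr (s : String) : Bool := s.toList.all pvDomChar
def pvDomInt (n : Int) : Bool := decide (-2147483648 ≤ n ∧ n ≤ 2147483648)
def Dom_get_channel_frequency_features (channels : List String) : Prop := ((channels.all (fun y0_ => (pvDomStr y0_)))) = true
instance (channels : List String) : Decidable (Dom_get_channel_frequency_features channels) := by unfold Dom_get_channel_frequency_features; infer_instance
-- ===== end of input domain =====

-- B replaces A's six-way if/elif tallying loop by a one-pass first-letter frequency table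
-- (a Counter-style dict over ch.upper()[:1]) from which the five band counts are read off
-- and 'other' is derived as len(channels) minus their sum; objective: simpler decomposition.


-- ===== PORT A =====
-- A's loop body: features['X'] += 1 on an always-present key, i.e. Dict.modify "X" 0 (· + 1)
def pvStepA (d : PySem.Dict String Int) (ch : String) : PySem.Dict String Int :=
  let chU := PySem.Str.upper ch
  if PySem.Str.startswith chU "F" then d.modify "frontal" 0 (· + 1)
  else if PySem.Str.startswith chU "T" then d.modify "temporal" 0 (· + 1)
  else if PySem.Str.startswith chU "P" then d.modify "parietal" 0 (· + 1)
  else if PySem.Str.startswith chU "O" then d.modify "occipital" 0 (· + 1)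
  else if PySem.Str.startswith chU "C" then d.modify "central" 0 (· + 1)
  else d.modify "other" 0 (· + 1)

def get_channel_frequency_features (channels : List String) : List (String × Int) :=
  (channels.foldl pvStepA
    (PySem.Dict.ofList [("frontal", 0), ("temporal", 0), ("parietal", 0),
                        ("occipital", 0), ("central", 0), ("other", 0)])).items

-- ===== PORT B =====
-- ch.upper()[:1]
def pvKey1 (ch : String) : String := PySem.Str.slice (PySem.Str.upper ch) none (some 1)

def get_channel_frequency_features_alt (channels : List String) : List (String × Int) :=
  let first := channels.foldl
    (fun d ch => let k := pvKey1 ch; d.insert k (d.getD k 0 + 1)) PySem.Dict.empty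
  let f := first.getD "F" 0
  let t := first.getD "T" 0
  let p := first.getD "P" 0
  let o := first.getD "O" 0
  let c := first.getD "C" 0
  [("frontal", f), ("temporal", t), ("parietal", p), ("occipital", o), ("central", c),
   ("other", (channels.length : Int) - (f + t + p + o + c))]

-- ===== PRECONDITION & SPEC =====
def Spec_get_channel_frequency_features (channels : List String) (out : List (String × Int)) : Prop := out = get_channel_frequency_features_alt channels
instance (channels : List String) (out : List (String × Int)) : Decidable (Spec_get_channel_frequency_features channels out) := by unfold Spec_get_channel_frequency_features; infer_instance

-- ===== CLAIM (what is proved, stated in full; the proofs are below) =====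
def Claim_equal_get_channel_frequency_features : Prop := ∀ (channels : List String), Dom_get_channel_frequency_features channels → Spec_get_channel_frequency_features channels (get_channel_frequency_features channels)

-- ===== LEMMAS AND PROOFS =====

-- the band name A's if/elif chain selects for a channel
def pvBucket (ch : String) : String :=
  let chU := PySem.Str.upper ch
  if PySem.Str.startswith chU "F" then "frontal"
  else if PySem.Str.startswith chU "T" then "temporal"
  else if PySem.Str.startswith chU "P" then "parietal"
  else if PySem.Str.startswith chU "O" then "occipital"
  else if PySem.Str.startswith chU "C" then "central"
  else "other"

lemma stepA_eq (d : PySem.Dict String Int) (ch : String) :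
    pvStepA d ch = d.modify (pvBucket ch) 0 (· + 1) := by
  unfold pvStepA pvBucket
  dsimp only
  split_ifs <;> rfl

lemma take1_eq_singleton_iff (cs : List Char) (c : Char) :
    (cs.take 1 = [c]) ↔ PySem.Chars.startswith cs [c] = true := by
  rw [PySem.Chars.startswith_iff]
  cases cs with
  | nil => simp
  | cons d t => simp [List.take, List.cons_prefix_cons, eq_comm]

-- pvKey1 ch equals a one-letter string iff ch.upper() starts with that letter
lemma key1_eq_iff (ch : String) (c : Char) :
    (pvKey1 ch = String.ofList [c]) ↔
      PySem.Str.startswith (PySem.Str.upper ch) (String.ofList [c]) = true := by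
  rw [← String.toList_inj, PySem.Str.startswith_eq]
  have h1 : (pvKey1 ch).toList = ((PySem.Str.upper ch).toList).take 1 := by
    show (PySem.Str.slice _ _ _).toList = _
    rw [PySem.Str.toList_slice]
    exact PySem.List.slice_to _ (by norm_num)
  have h2 : (String.ofList [c]).toList = [c] := by simp
  rw [h1, h2, take1_eq_singleton_iff]

-- a string starts with at most one first letter
lemma chars_excl (cs : List Char) (c c' : Char) (h : c ≠ c')
    (h1 : PySem.Chars.startswith cs [c] = true) :
    PySem.Chars.startswith cs [c'] = false := by
  rw [← Bool.not_eq_true, PySem.Chars.startswith_iff]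
  rw [PySem.Chars.startswith_iff] at h1
  cases cs with
  | nil => simp at h1
  | cons d t =>
    simp [List.cons_prefix_cons] at h1 ⊢
    intro e; exact h (h1.trans e.symm)

lemma key_bucket_F (ch : String) : (pvKey1 ch == "F") = (pvBucket ch == "frontal") := by
  have hk := key1_eq_iff ch 'F'
  have eF : ("F" : String) = String.ofList ['F'] := by decide
  apply Bool.eq_iff_iff.mpr
  simp only [beq_iff_eq, eF, hk]
  unfold pvBucket
  dsimp only
  rw [eF]
  split_ifs with h1 h2 h3 h4 h5 <;> simp_all <;>
    first
      | exact chars_excl _ 'F' 'F' (by decide) h1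
      | exact chars_excl _ 'T' 'F' (by decide) h2
      | exact chars_excl _ 'P' 'F' (by decide) h3
      | exact chars_excl _ 'O' 'F' (by decide) h4
      | exact chars_excl _ 'C' 'F' (by decide) h5

lemma key_bucket_T (ch : String) : (pvKey1 ch == "T") = (pvBucket ch == "temporal") := by
  have hk := key1_eq_iff ch 'T'
  have eF : ("F" : String) = String.ofList ['F'] := by decide
  have eT : ("T" : String) = String.ofList ['T'] := by decide
  apply Bool.eq_iff_iff.mpr
  simp only [beq_iff_eq, eT, hk]
  unfold pvBucket
  dsimp only
  rw [eF, eT]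
  split_ifs with h1 h2 h3 h4 h5 <;> simp_all <;>
    first
      | exact chars_excl _ 'F' 'T' (by decide) h1
      | exact chars_excl _ 'T' 'T' (by decide) h2
      | exact chars_excl _ 'P' 'T' (by decide) h3
      | exact chars_excl _ 'O' 'T' (by decide) h4
      | exact chars_excl _ 'C' 'T' (by decide) h5

lemma key_bucket_P (ch : String) : (pvKey1 ch == "P") = (pvBucket ch == "parietal") := by
  have hk := key1_eq_iff ch 'P'
  have eF : ("F" : String) = String.ofList ['F'] := by decide
  have eT : ("T" : String) = String.ofList ['T'] := by decide
  have eP : ("P" : String) = String.ofList ['P'] := by decide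
  apply Bool.eq_iff_iff.mpr
  simp only [beq_iff_eq, eP, hk]
  unfold pvBucket
  dsimp only
  rw [eF, eT, eP]
  split_ifs with h1 h2 h3 h4 h5 <;> simp_all <;>
    first
      | exact chars_excl _ 'F' 'P' (by decide) h1
      | exact chars_excl _ 'T' 'P' (by decide) h2
      | exact chars_excl _ 'P' 'P' (by decide) h3
      | exact chars_excl _ 'O' 'P' (by decide) h4
      | exact chars_excl _ 'C' 'P' (by decide) h5

lemma key_bucket_O (ch : String) : (pvKey1 ch == "O") = (pvBucket ch == "occipital") := by
  have hk := key1_eq_iff ch 'O'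
  have eF : ("F" : String) = String.ofList ['F'] := by decide
  have eT : ("T" : String) = String.ofList ['T'] := by decide
  have eP : ("P" : String) = String.ofList ['P'] := by decide
  have eO : ("O" : String) = String.ofList ['O'] := by decide
  apply Bool.eq_iff_iff.mpr
  simp only [beq_iff_eq, eO, hk]
  unfold pvBucket
  dsimp only
  rw [eF, eT, eP, eO]
  split_ifs with h1 h2 h3 h4 h5 <;> simp_all <;>
    first
      | exact chars_excl _ 'F' 'O' (by decide) h1
      | exact chars_excl _ 'T' 'O' (by decide) h2
      | exact chars_excl _ 'P' 'O' (by decide) h3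
      | exact chars_excl _ 'O' 'O' (by decide) h4
      | exact chars_excl _ 'C' 'O' (by decide) h5

lemma key_bucket_C (ch : String) : (pvKey1 ch == "C") = (pvBucket ch == "central") := by
  have hk := key1_eq_iff ch 'C'
  have eF : ("F" : String) = String.ofList ['F'] := by decide
  have eT : ("T" : String) = String.ofList ['T'] := by decide
  have eP : ("P" : String) = String.ofList ['P'] := by decide
  have eO : ("O" : String) = String.ofList ['O'] := by decide
  have eC : ("C" : String) = String.ofList ['C'] := by decide
  apply Bool.eq_iff_iff.mpr
  simp only [beq_iff_eq, eC, hk]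
  unfold pvBucket
  dsimp only
  rw [eF, eT, eP, eO, eC]
  split_ifs with h1 h2 h3 h4 h5 <;> simp_all <;>
    first
      | exact chars_excl _ 'F' 'C' (by decide) h1
      | exact chars_excl _ 'T' 'C' (by decide) h2
      | exact chars_excl _ 'P' 'C' (by decide) h3
      | exact chars_excl _ 'O' 'C' (by decide) h4
      | exact chars_excl _ 'C' 'C' (by decide) h5

lemma pvBucket_mem (ch : String) :
    pvBucket ch ∈ ["frontal", "temporal", "parietal", "occipital", "central", "other"] := by
  unfold pvBucket; dsimp only; split_ifs <;> simp

lemma foldl_modify_bucket (l : List String) (d : PySem.Dict String Int) :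
    l.foldl (fun d ch => d.modify (pvBucket ch) 0 (· + 1)) d =
      (l.map pvBucket).foldl (fun d x => d.modify x 0 (· + 1)) d := by
  rw [List.foldl_map]

lemma foldl_insert_key1 (l : List String) (d : PySem.Dict String Int) :
    l.foldl (fun d ch => let k := pvKey1 ch; d.insert k (d.getD k 0 + 1)) d =
      (l.map pvKey1).foldl (fun d x => d.insert x (d.getD x 0 + 1)) d := by
  rw [List.foldl_map]

-- A's result, characterised by bucket counts
lemma A_eq (channels : List String) :
    get_channel_frequency_features channels =
      [("frontal", ((channels.map pvBucket).count "frontal" : Int)),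
       ("temporal", ((channels.map pvBucket).count "temporal" : Int)),
       ("parietal", ((channels.map pvBucket).count "parietal" : Int)),
       ("occipital", ((channels.map pvBucket).count "occipital" : Int)),
       ("central", ((channels.map pvBucket).count "central" : Int)),
       ("other", ((channels.map pvBucket).count "other" : Int))] := by
  unfold get_channel_frequency_features
  have hstep : pvStepA = fun d ch => d.modify (pvBucket ch) 0 (· + 1) :=
    funext fun d => funext fun ch => stepA_eq d ch
  rw [hstep, foldl_modify_bucket]
  set d0 : PySem.Dict String Int :=
    PySem.Dict.ofList [("frontal", 0), ("temporal", 0), ("parietal", 0),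
                       ("occipital", 0), ("central", 0), ("other", 0)] with hd0
  set bl := channels.map pvBucket with hbl
  have hkeys : ((bl.foldl (fun d x => d.modify x 0 (· + 1)) d0)).keys =
      ["frontal", "temporal", "parietal", "occipital", "central", "other"] := by
    rw [PySem.Dict.keys_foldl_modify bl 0 (fun _ _ => (· + 1)) d0]
    rw [PySem.Set.update_eq_append_filter]
    have hfil : (PySem.Set.ofList bl).filter (fun y => !PySem.Set.contains (PySem.Dict.keys d0) y) = [] := by
      rw [List.filter_eq_nil_iff]
      intro y hy
      have hy' : y ∈ bl := (PySem.Set.mem_ofList _ _).mp hy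
      obtain ⟨ch, _, rfl⟩ := List.mem_map.mp (hbl ▸ hy')
      have hm := pvBucket_mem ch
      simp only [List.mem_cons, List.not_mem_nil, or_false] at hm
      rcases hm with h | h | h | h | h | h <;> rw [h, hd0] <;> decide
    rw [hfil]
    simp only [List.append_nil, hd0]
    decide
  have hnd : ((bl.foldl (fun d x => d.modify x 0 (· + 1)) d0)).keys.Nodup := by
    rw [hkeys]; decide
  rw [PySem.Dict.items_eq_map_keys _ hnd 0, hkeys]
  have hg : ∀ v : String, (bl.foldl (fun d x => d.modify x 0 (· + 1)) d0).getD v 0 =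
      d0.getD v 0 + (bl.count v : Int) := fun v =>
    PySem.Dict.getD_foldl_modify_add_one bl d0 v
  have z1 : d0.getD "frontal" 0 = 0 := by rw [hd0]; decide
  have z2 : d0.getD "temporal" 0 = 0 := by rw [hd0]; decide
  have z3 : d0.getD "parietal" 0 = 0 := by rw [hd0]; decide
  have z4 : d0.getD "occipital" 0 = 0 := by rw [hd0]; decide
  have z5 : d0.getD "central" 0 = 0 := by rw [hd0]; decide
  have z6 : d0.getD "other" 0 = 0 := by rw [hd0]; decide
  simp [hg, z1, z2, z3, z4, z5, z6]

-- B's result, characterised by first-letter counts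
lemma B_eq (channels : List String) :
    get_channel_frequency_features_alt channels =
      [("frontal", ((channels.map pvKey1).count "F" : Int)),
       ("temporal", ((channels.map pvKey1).count "T" : Int)),
       ("parietal", ((channels.map pvKey1).count "P" : Int)),
       ("occipital", ((channels.map pvKey1).count "O" : Int)),
       ("central", ((channels.map pvKey1).count "C" : Int)),
       ("other", (channels.length : Int) -
          (((channels.map pvKey1).count "F" : Int) + ((channels.map pvKey1).count "T" : Int) +
           ((channels.map pvKey1).count "P" : Int) + ((channels.map pvKey1).count "O" : Int) +
           ((channels.map pvKey1).count "C" : Int)))] := by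
  unfold get_channel_frequency_features_alt
  rw [foldl_insert_key1, PySem.Dict.foldl_insert_getD_add_one_eq_counter]
  simp [PySem.Dict.getD_counter]

-- count of a bucket name equals count of its first letter
lemma count_bucket_eq (channels : List String) (c : Char) (name : String)
    (h : ∀ ch : String, (pvKey1 ch == String.ofList [c]) = (pvBucket ch == name)) :
    (channels.map pvKey1).count (String.ofList [c]) = (channels.map pvBucket).count name := by
  simp only [List.count, List.countP_map]
  refine List.countP_congr fun ch _ => ?_
  simp only [Function.comp_apply]
  rw [h ch]

-- the six bucket counts partition the list
lemma bucket_counts_sum (l : List String)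
    (h : ∀ x ∈ l, x ∈ ["frontal", "temporal", "parietal", "occipital", "central", "other"]) :
    l.count "frontal" + l.count "temporal" + l.count "parietal" + l.count "occipital" +
      l.count "central" + l.count "other" = l.length := by
  induction l with
  | nil => simp
  | cons x t ih =>
    have hx := h x (by simp)
    have ht := ih fun y hy => h y (by simp [hy])
    simp only [List.mem_cons, List.not_mem_nil, or_false] at hx
    rcases hx with rfl | rfl | rfl | rfl | rfl | rfl <;> simp [List.count_cons] <;> omega

-- ===== VERDICT (by name: the statement is the Claim_ definition above) =====
theorem get_channel_frequency_features_spec : Claim_equal_get_channel_frequency_features := by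
  intro channels _
  show get_channel_frequency_features channels = get_channel_frequency_features_alt channels
  rw [A_eq, B_eq]
  have eF : ("F" : String) = String.ofList ['F'] := by decide
  have eT : ("T" : String) = String.ofList ['T'] := by decide
  have eP : ("P" : String) = String.ofList ['P'] := by decide
  have eO : ("O" : String) = String.ofList ['O'] := by decide
  have eC : ("C" : String) = String.ofList ['C'] := by decide
  have cF := count_bucket_eq channels 'F' "frontal" (fun ch => eF ▸ key_bucket_F ch)
  have cT := count_bucket_eq channels 'T' "temporal" (fun ch => eT ▸ key_bucket_T ch)
  have cP := count_bucket_eq channels 'P' "parietal" (fun ch => eP ▸ key_bucket_P ch)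
  have cO := count_bucket_eq channels 'O' "occipital" (fun ch => eO ▸ key_bucket_O ch)
  have cC := count_bucket_eq channels 'C' "central" (fun ch => eC ▸ key_bucket_C ch)
  rw [eF, eT, eP, eO, eC, cF, cT, cP, cO, cC]
  have hsum := bucket_counts_sum (channels.map pvBucket)
    (fun y hy => by obtain ⟨ch, _, rfl⟩ := List.mem_map.mp hy; exact pvBucket_mem ch)
  rw [List.length_map] at hsum
  have : ((channels.map pvBucket).count "other" : Int) =
      (channels.length : Int) -
        (((channels.map pvBucket).count "frontal" : Int) +
         ((channels.map pvBucket).count "temporal" : Int) +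
         ((channels.map pvBucket).count "parietal" : Int) +
         ((channels.map pvBucket).count "occipital" : Int) +
         ((channels.map pvBucket).count "central" : Int)) := by
    omega
  rw [this]
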